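-- pv_equiv track=rewrite | github.com/mhmdhjere/PythonKatasFursa | katas/is_valid_git_tree.py | has_one_root
-- ===== SOURCE A (Python) =====
-- def has_one_root(tree_map):
--     visited = {}
--     for vertex,neighbors in tree_map.items():
--         for v in neighbors:
--             if visited.get(v) == True:
--                 return False
--             visited[v] = True
--
--     roots = [node for node in tree_map if node not in visited]
--     return len(roots) == 1
-- ===== SOURCE B (Python) =====
-- def has_one_root(tree_map):
--     # Sort-and-merge instead of hashing: duplicates are found by an
--     # adjacent-pair scan of the sorted child list, and roots are counted by a
--     # two-pointer merge of the sorted key list against the sorted child list.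
--     children = sorted(v for neighbors in tree_map.values() for v in neighbors)
--     if any(a == b for a, b in zip(children, children[1:])):
--         return False
--     roots = 0
--     i = 0
--     for k in sorted(tree_map):
--         while i < len(children) and children[i] < k:
--             i += 1
--         if i == len(children) or children[i] != k:
--             roots += 1
--     return roots == 1
-- ===== Notes on version B (the rewrite author's own statement) =====
-- stated objective: alternative
-- what changed: Replaces A's hash-dict detect-on-insert with early exit by a comparison-based sort-and-merge: sort the flattened child list and scan adjacent pairs for a duplicate, then count roots by a two-pointer merge of the sorted key list against the sorted child list (no hashing, no membership tests).
import Mathlib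
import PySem

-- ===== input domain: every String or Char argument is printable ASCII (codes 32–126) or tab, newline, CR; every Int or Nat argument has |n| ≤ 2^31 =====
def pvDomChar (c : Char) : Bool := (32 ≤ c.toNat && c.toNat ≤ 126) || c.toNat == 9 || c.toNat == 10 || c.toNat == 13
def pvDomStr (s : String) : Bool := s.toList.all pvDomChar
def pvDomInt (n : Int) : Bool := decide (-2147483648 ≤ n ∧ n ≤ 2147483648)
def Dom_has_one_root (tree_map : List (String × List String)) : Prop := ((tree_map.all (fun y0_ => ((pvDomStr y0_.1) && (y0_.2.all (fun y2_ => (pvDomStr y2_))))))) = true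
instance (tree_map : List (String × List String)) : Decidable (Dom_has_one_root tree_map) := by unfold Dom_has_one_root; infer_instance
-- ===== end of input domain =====

-- B replaces A's hash-dict detect-on-insert (early exit) by a comparison-based sort-and-merge:
-- adjacent-pair duplicate scan of the sorted child list, then a two-pointer merge of the sorted
-- key list against it to count roots; objective: alternative (same result, different algorithm).

-- ===== PORT A =====
-- inner loop: 'for v in neighbors: if visited.get(v) == True: return False; visited[v] = True'
def hasRootInner : List String → PySem.Dict String Bool → Option (PySem.Dict String Bool)
  | [], visited => some visited
  | v :: rest, visited =>
      if visited.get? v = some true then none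
      else hasRootInner rest (visited.insert v true)

-- outer loop over tree_map.items(); none = the early 'return False'
def hasRootOuter : List (String × List String) → PySem.Dict String Bool → Option (PySem.Dict String Bool)
  | [], visited => some visited
  | p :: rest, visited =>
      match hasRootInner p.2 visited with
      | none => none
      | some visited' => hasRootOuter rest visited'

def has_one_root (tree_map : List (String × List String)) : Bool :=
  match hasRootOuter tree_map PySem.Dict.empty with
  | none => false
  | some visited =>
      decide (((tree_map.map (fun p => p.1)).filter
        (fun node => !(visited.contains node))).length = 1)

-- ===== PORT B =====
-- the 'while i < len(children) and children[i] < k: i += 1' pointer advance,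
-- with the consumed prefix dropped
def skipLt (k : String) : List String → List String
  | [] => []
  | c :: rest => if c < k then skipLt k rest else c :: rest

-- 'for k in sorted(tree_map): …' merge loop accumulating roots
def rootsLoop : List String → List String → Int → Int
  | [], _, roots => roots
  | k :: ks, cs, roots =>
      let cs' := skipLt k cs
      match cs' with
      | [] => rootsLoop ks cs' (roots + 1)          -- i == len(children)
      | c :: _ => if c = k then rootsLoop ks cs' roots
                  else rootsLoop ks cs' (roots + 1) -- children[i] != k

def has_one_root_alt (tree_map : List (String × List String)) : Bool :=
  let children := PySem.List.sorted (tree_map.flatMap (fun p => p.2)) (fun x => x) false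
  if (children.zip children.tail).any (fun p => p.1 == p.2) then false
  else
    decide (rootsLoop (PySem.List.sorted (tree_map.map (fun p => p.1)) (fun x => x) false)
      children 0 = 1)

-- ===== PRECONDITION & SPEC =====
def Spec_has_one_root (tree_map : List (String × List String)) (out : Bool) : Prop := out = has_one_root_alt tree_map
instance (tree_map : List (String × List String)) (out : Bool) : Decidable (Spec_has_one_root tree_map out) := by unfold Spec_has_one_root; infer_instance

-- ===== CLAIM (what is proved, stated in full; the proofs are below) =====
def Claim_equal_has_one_root : Prop := ∀ (tree_map : List (String × List String)), Dom_has_one_root tree_map → Spec_has_one_root tree_map (has_one_root tree_map)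

-- ===== LEMMAS AND PROOFS =====

-- the visited dict after seeing the children in `seen`: key present (with value true) iff seen
def SeenState (seen : List String) (d : PySem.Dict String Bool) : Prop :=
  ∀ v, d.get? v = if v ∈ seen then some true else none

theorem hasRootInner_spec (vs : List String) :
    ∀ (seen : List String) (d : PySem.Dict String Bool), seen.Nodup → SeenState seen d →
    if (seen ++ vs).Nodup then
      ∃ d', hasRootInner vs d = some d' ∧ SeenState (seen ++ vs) d'
    else hasRootInner vs d = none := by
  induction vs with
  | nil =>
      intro seen d hnd hs
      rw [List.append_nil, if_pos hnd]
      exact ⟨d, rfl, hs⟩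
  | cons v rest ih =>
      intro seen d hnd hs
      by_cases hv : v ∈ seen
      · have hnotnd : ¬ (seen ++ v :: rest).Nodup := by
          intro h
          exact (List.disjoint_of_nodup_append h) hv List.mem_cons_self
        simp only [hnotnd, if_false, hasRootInner, hs v, hv, if_true]
      · have hget : d.get? v = none := by rw [hs v]; simp [hv]
        have hstep : hasRootInner (v :: rest) d
            = hasRootInner rest (d.insert v true) := by
          simp [hasRootInner, hget]
        have hnd' : (seen ++ [v]).Nodup :=
          hnd.append (List.nodup_singleton v)
            (fun _ ha hb => hv ((List.mem_singleton.mp hb) ▸ ha))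
        have hs' : SeenState (seen ++ [v]) (d.insert v true) := by
          intro w
          by_cases hw : w = v
          · subst hw; simp [PySem.Dict.get?_insert_self]
          · rw [PySem.Dict.get?_insert_of_ne d true hw, hs w]
            simp [hw]
        have := ih (seen ++ [v]) (d.insert v true) hnd' hs'
        rw [hstep]
        simpa [List.append_assoc] using this

theorem hasRootOuter_spec (pairs : List (String × List String)) :
    ∀ (seen : List String) (d : PySem.Dict String Bool), seen.Nodup → SeenState seen d →
    if (seen ++ pairs.flatMap (fun p => p.2)).Nodup then
      ∃ d', hasRootOuter pairs d = some d' ∧ SeenState (seen ++ pairs.flatMap (fun p => p.2)) d'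
    else hasRootOuter pairs d = none := by
  induction pairs with
  | nil =>
      intro seen d hnd hs
      rw [List.flatMap_nil, List.append_nil, if_pos hnd]
      exact ⟨d, rfl, hs⟩
  | cons p rest ih =>
      intro seen d hnd hs
      have hin := hasRootInner_spec p.2 seen d hnd hs
      by_cases h1 : (seen ++ p.2).Nodup
      · rw [if_pos h1] at hin
        obtain ⟨d', hd', hs'⟩ := hin
        have := ih (seen ++ p.2) d' h1 hs'
        have hout : hasRootOuter (p :: rest) d = hasRootOuter rest d' := by
          simp [hasRootOuter, hd']
        rw [hout]
        simpa [List.flatMap_cons, List.append_assoc] using this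
      · rw [if_neg h1] at hin
        have hnotbig : ¬ (seen ++ (p :: rest).flatMap (fun p => p.2)).Nodup := by
          intro h
          apply h1
          have hsub : (seen ++ p.2).Sublist (seen ++ (p :: rest).flatMap (fun p => p.2)) := by
            simp only [List.flatMap_cons, ← List.append_assoc]
            exact (List.sublist_append_left _ _)
          exact h.sublist hsub
        simp only [hnotbig, if_false, hasRootOuter, hin]

theorem visited_contains_eq (children : List String) (d : PySem.Dict String Bool)
    (hs : SeenState children d) (node : String) :
    d.contains node = decide (node ∈ children) := by
  rw [PySem.Dict.contains_eq_isSome_get?, hs node]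
  by_cases h : node ∈ children
  · simp [h]
  · simp [h]

-- adjacent-duplicate scan on a (≤)-sorted list detects exactly non-Nodup
theorem adjDup_iff_not_nodup (cs : List String) (hp : cs.Pairwise (· ≤ ·)) :
    ((cs.zip cs.tail).any (fun p => p.1 == p.2)) = true ↔ ¬ cs.Nodup := by
  induction cs with
  | nil => simp
  | cons a rest ih =>
      match rest, hp with
      | [], _ => simp
      | b :: rest', hp =>
        have hpr : (b :: rest').Pairwise (· ≤ ·) := hp.of_cons
        have hab : a ≤ b := (List.pairwise_cons.mp hp).1 b List.mem_cons_self
        by_cases he : a = b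
        · subst he
          simp [List.zip, List.any_cons]
        · have hnm : a ∉ b :: rest' := by
            intro hm
            rcases List.mem_cons.mp hm with h | h
            · exact he h
            · have hbx : b ≤ a := (List.pairwise_cons.mp hpr).1 a h
              exact he (le_antisymm hab hbx)
          have : ((a, b) :: (b :: rest').zip rest').any (fun p => p.1 == p.2)
              = ((b :: rest').zip rest').any (fun p => p.1 == p.2) := by
            simp [List.any_cons, he]
          simp only [List.tail_cons] at ih
          simp only [List.tail_cons, List.zip_cons_cons, this]
          rw [ih hpr]
          simp [List.nodup_cons, hnm]

-- skipLt drops a prefix of elements < k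
theorem skipLt_decomp (k : String) (cs : List String) :
    ∃ pre, cs = pre ++ skipLt k cs ∧ ∀ x ∈ pre, x < k := by
  induction cs with
  | nil => exact ⟨[], rfl, by simp⟩
  | cons c rest ih =>
      by_cases hc : c < k
      · obtain ⟨pre, hpre, hlt⟩ := ih
        refine ⟨c :: pre, ?_, ?_⟩
        · simp [skipLt, hc, ← hpre]
        · intro x hx
          rcases List.mem_cons.mp hx with h | h
          · exact h ▸ hc
          · exact hlt x h
      · exact ⟨[], by simp [skipLt, hc], by simp⟩

theorem skipLt_pairwise (k : String) (cs : List String) (hp : cs.Pairwise (· ≤ ·)) :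
    (skipLt k cs).Pairwise (· ≤ ·) := by
  obtain ⟨pre, hpre, _⟩ := skipLt_decomp k cs
  exact (List.pairwise_append.mp (hpre ▸ hp)).2.1

theorem skipLt_mem (k k' : String) (hk : k ≤ k') (cs : List String) :
    k' ∈ cs ↔ k' ∈ skipLt k cs := by
  obtain ⟨pre, hpre, hlt⟩ := skipLt_decomp k cs
  constructor
  · intro h
    rcases List.mem_append.mp (hpre ▸ h) with h | h
    · exact absurd (lt_of_lt_of_le (hlt _ h) hk) (lt_irrefl k')
    · exact h
  · intro h
    rw [hpre]
    exact List.mem_append_right _ h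

theorem skipLt_head (k : String) (cs : List String) (hp : cs.Pairwise (· ≤ ·)) :
    (skipLt k cs).head? = some k ↔ k ∈ cs := by
  induction cs with
  | nil => simp [skipLt]
  | cons c rest ih =>
      have hpr : rest.Pairwise (· ≤ ·) := hp.of_cons
      by_cases hc : c < k
      · rw [show skipLt k (c :: rest) = skipLt k rest from by simp [skipLt, hc]]
        rw [ih hpr]
        simp only [List.mem_cons]
        constructor
        · exact Or.inr
        · rintro (h | h)
          · exact absurd (h ▸ hc) (lt_irrefl k)
          · exact h
      · rw [show skipLt k (c :: rest) = c :: rest from by simp [skipLt, hc]]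
        simp only [List.head?_cons, Option.some_inj, List.mem_cons]
        constructor
        · intro h; exact Or.inl h.symm
        · rintro (h | h)
          · exact h.symm
          · have h1 : c ≤ k := (List.pairwise_cons.mp hp).1 k h
            exact le_antisymm h1 (not_lt.mp hc)

-- the merge loop counts, over the sorted key list, the keys absent from the child list
theorem rootsLoop_spec (keys : List String) :
    ∀ (cs : List String) (roots : Int), keys.Pairwise (· ≤ ·) → cs.Pairwise (· ≤ ·) →
    rootsLoop keys cs roots = roots + (keys.countP (fun k => !(decide (k ∈ cs))) : Int) := by
  induction keys with
  | nil => intro cs roots _ _; simp [rootsLoop]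
  | cons k ks ih =>
      intro cs roots hpk hpc
      have hpk' : ks.Pairwise (· ≤ ·) := hpk.of_cons
      have hpc' : (skipLt k cs).Pairwise (· ≤ ·) := skipLt_pairwise k cs hpc
      have hcount : ks.countP (fun k' => !(decide (k' ∈ skipLt k cs)))
          = ks.countP (fun k' => !(decide (k' ∈ cs))) := by
        apply List.countP_congr
        intro k' hk'
        have hle : k ≤ k' := (List.pairwise_cons.mp hpk).1 k' hk'
        simp [skipLt_mem k k' hle cs]
      have hhead := skipLt_head k cs hpc
      by_cases hmem : k ∈ cs
      · have hh : (skipLt k cs).head? = some k := hhead.mpr hmem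
        rcases hcs : skipLt k cs with _ | ⟨c, rest⟩
        · rw [hcs] at hh; simp at hh
        · rw [hcs] at hh
          have hck : c = k := by simpa using hh
          rw [hcs] at hpc' hcount
          rw [show rootsLoop (k :: ks) cs roots = rootsLoop ks (c :: rest) roots from by
            simp [rootsLoop, hcs, hck]]
          rw [ih (c :: rest) roots hpk' hpc', hcount]
          simp [hmem]
      · have hne : (skipLt k cs).head? ≠ some k := fun h => hmem (hhead.mp h)
        have hstep : rootsLoop (k :: ks) cs roots = rootsLoop ks (skipLt k cs) (roots + 1) := by
          rcases hcs : skipLt k cs with _ | ⟨c, rest⟩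
          · simp [rootsLoop, hcs]
          · have hck : c ≠ k := by rw [hcs] at hne; simpa using hne
            simp [rootsLoop, hcs, hck]
        rw [hstep, ih (skipLt k cs) (roots + 1) hpk' hpc', hcount]
        simp [hmem]
        omega

-- ===== VERDICT (by name: the statement is the Claim_ definition above) =====
theorem has_one_root_spec : Claim_equal_has_one_root := by
  intro tm _
  unfold Spec_has_one_root has_one_root has_one_root_alt
  have hstart : SeenState [] (PySem.Dict.empty : PySem.Dict String Bool) := by
    intro v; simp [PySem.Dict.get?_empty]
  have h := hasRootOuter_spec tm [] PySem.Dict.empty List.nodup_nil hstart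
  simp only [List.nil_append] at h
  set children := tm.flatMap (fun p => p.2) with hch
  have hperm : (PySem.List.sorted children (fun x => x) false).Perm children :=
    PySem.List.sorted_perm children (fun x => x) false
  have hpc : (PySem.List.sorted children (fun x => x) false).Pairwise (· ≤ ·) :=
    PySem.List.sorted_pairwise children (fun x => x)
  have hadj := adjDup_iff_not_nodup (PySem.List.sorted children (fun x => x) false) hpc
  by_cases hnd : children.Nodup
  · rw [if_pos hnd] at h
    obtain ⟨d', hd', hs'⟩ := h
    have hnds : (PySem.List.sorted children (fun x => x) false).Nodup :=
      (hperm.nodup_iff).mpr hnd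
    have hadjF : ((PySem.List.sorted children (fun x => x) false).zip
        (PySem.List.sorted children (fun x => x) false).tail).any (fun p => p.1 == p.2) = false := by
      rcases hb : ((PySem.List.sorted children (fun x => x) false).zip
          (PySem.List.sorted children (fun x => x) false).tail).any (fun p => p.1 == p.2) with _ | _
      · rfl
      · exact absurd hnds (hadj.mp hb)
    simp only [hd', hadjF, Bool.false_eq_true, if_false]
    -- both sides now count the root keys
    have hkp : (PySem.List.sorted (tm.map (fun p => p.1)) (fun x => x) false).Pairwise (· ≤ ·) :=
      PySem.List.sorted_pairwise (tm.map (fun p => p.1)) (fun x => x)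
    rw [rootsLoop_spec _ _ 0 hkp hpc]
    have hcnt : (PySem.List.sorted (tm.map (fun p => p.1)) (fun x => x) false).countP
          (fun k => !(decide (k ∈ PySem.List.sorted children (fun x => x) false)))
        = (tm.map (fun p => p.1)).countP (fun node => !(d'.contains node)) := by
      rw [(PySem.List.sorted_perm (tm.map (fun p => p.1)) (fun x => x) false).countP_eq]
      apply List.countP_congr
      intro node _
      rw [visited_contains_eq children d' hs' node]
      simp [hperm.mem_iff]
    rw [hcnt, ← List.countP_eq_length_filter]
    simp only [zero_add, decide_eq_decide]
    omega
  · rw [if_neg hnd] at h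
    have hadjT : ((PySem.List.sorted children (fun x => x) false).zip
        (PySem.List.sorted children (fun x => x) false).tail).any (fun p => p.1 == p.2) = true :=
      hadj.mpr (fun hn => hnd ((hperm.nodup_iff).mp hn))
    simp [h, hadjT]
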